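-- pv_equiv track=rewrite | github.com/craigtrim/pystylometry | pystylometry/vocabulary/synonym_diversity.py | _build_cluster_data
-- ===== SOURCE A (Python) =====
-- from collections import Counter
--
-- def _build_cluster_data(
--     tokens: list[str], synonym_map: dict[str, str]
-- ) -> dict[str, Counter[str]]:
--     """Assign tokens to synonym clusters and count occurrences.
--
--     For each token, check if it exists in the synonym_map. If so, add it
--     to the appropriate cluster's Counter. Tokens not in the map are
--     silently ignored (they contribute to unmapped_word_count instead).
--
--     Args:
--         tokens: List of lowercase tokens from _tokenize().
--         synonym_map: Mapping of words to cluster IDs.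
--
--     Returns:
--         Dict mapping cluster_id to Counter of word occurrences within
--         that cluster. Only clusters with at least one observed word
--         are included.
--     """
--     clusters: dict[str, Counter[str]] = {}
--
--     for token in tokens:
--         cluster_id = synonym_map.get(token)
--         if cluster_id is not None:
--             if cluster_id not in clusters:
--                 clusters[cluster_id] = Counter()
--             clusters[cluster_id][token] += 1
--
--     return clusters
-- ===== SOURCE B (Python) =====
-- from collections import Counter
--
--
-- def _build_cluster_data(
--     tokens: list[str], synonym_map: dict[str, str]
-- ) -> dict[str, Counter[str]]:
--     """Two-phase: pair each token with its cluster id first, then build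
--     each cluster's Counter with a dedicated counting pass per cluster."""
--     mapped = [(synonym_map.get(t), t) for t in tokens]
--     mapped = [(c, t) for c, t in mapped if c is not None]
--     cluster_ids = list(dict.fromkeys(c for c, _ in mapped))
--     return {c: Counter(t for cid, t in mapped if cid == c) for c in cluster_ids}
-- ===== Notes on version B (the rewrite author's own statement) =====
-- stated objective: alternative
-- what changed: A builds nested dict-of-Counter by incrementing on the fly in one token loop; B first materialises the (cluster_id, token) pair list, dedups the cluster ids in first-occurrence order, and builds each cluster's Counter by a separate per-cluster counting pass over the pairs.
import Mathlib
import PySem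

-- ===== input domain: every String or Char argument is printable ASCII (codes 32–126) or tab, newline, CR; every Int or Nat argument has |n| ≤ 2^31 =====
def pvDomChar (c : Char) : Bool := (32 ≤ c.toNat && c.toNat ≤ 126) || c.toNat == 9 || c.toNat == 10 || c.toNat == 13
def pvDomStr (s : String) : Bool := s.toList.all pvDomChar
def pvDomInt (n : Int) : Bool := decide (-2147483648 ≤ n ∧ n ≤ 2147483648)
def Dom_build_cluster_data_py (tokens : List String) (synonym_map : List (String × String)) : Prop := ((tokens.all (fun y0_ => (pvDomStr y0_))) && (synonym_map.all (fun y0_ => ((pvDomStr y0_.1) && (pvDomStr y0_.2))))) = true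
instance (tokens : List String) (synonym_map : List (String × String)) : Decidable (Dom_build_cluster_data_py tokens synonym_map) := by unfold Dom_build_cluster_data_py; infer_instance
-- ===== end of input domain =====

-- B changes the decomposition (objective: alternative, not faster): A increments nested Counters token by
-- token in one pass; B first builds the (cluster_id, token) pair list, then dedups the cluster ids and
-- counts each cluster with its own pass over the pairs.

-- ===== PORT A =====
def build_cluster_data_py (tokens : List String) (synonym_map : List (String × String)) : List (String × List (String × Int)) :=
  (tokens.foldl
    (fun (clusters : PySem.Dict String (PySem.Dict String Int)) token =>
      match (PySem.Dict.mk synonym_map).get? token with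
      | none => clusters
      | some cluster_id =>
        let clusters := if clusters.contains cluster_id then clusters
                        else clusters.insert cluster_id PySem.Dict.empty
        clusters.modify cluster_id PySem.Dict.empty (fun cnt => cnt.modify token 0 (· + 1)))
    PySem.Dict.empty).items.map (fun p => (p.1, p.2.items))

-- ===== PORT B =====
def build_cluster_data_py_alt (tokens : List String) (synonym_map : List (String × String)) : List (String × List (String × Int)) :=
  let mapped0 := tokens.map (fun t => ((PySem.Dict.mk synonym_map).get? t, t))
  let mapped := mapped0.filterMap (fun p => p.1.map (fun c => (c, p.2)))
  let cluster_ids := PySem.List.dedup (mapped.map Prod.fst)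
  cluster_ids.map (fun c =>
    (c, (PySem.Dict.counter ((mapped.filter (fun p => p.1 == c)).map Prod.snd)).items))

-- ===== PRECONDITION & SPEC =====
def Spec_build_cluster_data_py (tokens : List String) (synonym_map : List (String × String)) (out : List (String × List (String × Int))) : Prop := out = build_cluster_data_py_alt tokens synonym_map
instance (tokens : List String) (synonym_map : List (String × String)) (out : List (String × List (String × Int))) : Decidable (Spec_build_cluster_data_py tokens synonym_map out) := by unfold Spec_build_cluster_data_py; infer_instance

-- ===== CLAIM (what is proved, stated in full; the proofs are below) =====
def Claim_equal_build_cluster_data_py : Prop := ∀ (tokens : List String) (synonym_map : List (String × String)), Dom_build_cluster_data_py tokens synonym_map → Spec_build_cluster_data_py tokens synonym_map (build_cluster_data_py tokens synonym_map)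

-- ===== LEMMAS AND PROOFS =====

-- A's loop body, as a function of one mapped pair (cluster_id, token)
def pvStep (d : PySem.Dict String (PySem.Dict String Int)) (p : String × String) : PySem.Dict String (PySem.Dict String Int) :=
  let d := if d.contains p.1 then d else d.insert p.1 PySem.Dict.empty
  d.modify p.1 PySem.Dict.empty (fun cnt => cnt.modify p.2 0 (· + 1))

-- the closed form both loops reach: one entry per first-occurrence cluster id, counting that cluster's tokens
def pvSpecDict (ps : List (String × String)) : PySem.Dict String (PySem.Dict String Int) :=
  PySem.Dict.mk ((PySem.List.dedup (ps.map Prod.fst)).map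
    (fun c => (c, PySem.Dict.counter ((ps.filter (fun p => p.1 == c)).map Prod.snd))))

lemma pv_foldA_eq (sm : List (String × String)) :
    ∀ (tokens : List String) (d : PySem.Dict String (PySem.Dict String Int)),
      tokens.foldl
        (fun clusters token =>
          match (PySem.Dict.mk sm).get? token with
          | none => clusters
          | some cluster_id =>
            let clusters := if clusters.contains cluster_id then clusters
                            else clusters.insert cluster_id PySem.Dict.empty
            clusters.modify cluster_id PySem.Dict.empty (fun cnt => cnt.modify token 0 (· + 1))) d
      = (tokens.filterMap (fun t => ((PySem.Dict.mk sm).get? t).map (fun c => (c, t)))).foldl pvStep d := by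
  intro tokens
  induction tokens with
  | nil => intro d; rfl
  | cons t ts ih =>
    intro d
    cases h : (PySem.Dict.mk sm).get? t with
    | none => simp [List.foldl_cons, h, ih]
    | some c => simp [List.foldl_cons, h, ih, pvStep]

lemma pv_contains_mkmap {ν : Type} (ks : List String) (v : String → ν) (c : String) :
    (PySem.Dict.mk (ks.map (fun k => (k, v k)))).contains c = decide (c ∈ ks) := by
  simp [PySem.Dict.contains, List.any_map, Function.comp_def, List.any_beq']

lemma pv_modify_mkmap {ν : Type} (ks : List String) (v : String → ν) (hnd : ks.Nodup)
    (c : String) (hc : c ∈ ks) (d0 : ν) (f : ν → ν) :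
    (PySem.Dict.mk (ks.map (fun k => (k, v k)))).modify c d0 f
      = PySem.Dict.mk (ks.map (fun k => (k, if k = c then f (v c) else v k))) := by
  have hkeys : (PySem.Dict.mk (ks.map (fun k => (k, v k)))).keys = ks := by
    simp [PySem.Dict.keys, List.map_map, Function.comp_def]
  have hgd : (PySem.Dict.mk (ks.map (fun k => (k, v k)))).getD c d0 = v c := by
    refine PySem.Dict.getD_of_mem_items _ ?_ ?_ d0
    · exact List.mem_map_of_mem hc
    · rw [hkeys]; exact hnd
  have hcont : (PySem.Dict.mk (ks.map (fun k => (k, v k)))).contains c = true := by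
    rw [pv_contains_mkmap]; simpa using hc
  rw [PySem.Dict.modify, hgd, PySem.Dict.insert]
  rw [hcont]
  simp only [if_true]
  congr 1
  rw [List.map_map]
  apply List.map_congr_left
  intro k _
  by_cases hkc : k = c
  · simp [hkc]
  · simp [hkc]

lemma pv_dedup_append (l : List String) (c : String) :
    PySem.List.dedup (l ++ [c]) = if c ∈ l then PySem.List.dedup l else PySem.List.dedup l ++ [c] := by
  rw [PySem.List.dedup, PySem.List.dedup, PySem.Set.ofList_eq_foldl, PySem.Set.ofList_eq_foldl, List.foldl_append]
  simp only [List.foldl_cons, List.foldl_nil, PySem.Set.add]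
  by_cases h : c ∈ l
  · simp [PySem.Set.contains, ← PySem.Set.ofList_eq_foldl, PySem.Set.mem_ofList, h]
  · simp [PySem.Set.contains, ← PySem.Set.ofList_eq_foldl, PySem.Set.mem_ofList, h]

lemma pv_fold_spec (ps : List (String × String)) :
    ps.foldl pvStep PySem.Dict.empty = pvSpecDict ps := by
  induction ps using List.reverseRecOn with
  | nil => rfl
  | append_singleton ps p ih =>
    obtain ⟨c, t⟩ := p
    rw [List.foldl_append, List.foldl_cons, List.foldl_nil, ih]
    unfold pvSpecDict pvStep
    by_cases hc : c ∈ ps.map Prod.fst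
    · -- existing cluster: A modifies in place, the spec's counter for c gains t
      have hc' : c ∈ PySem.List.dedup (ps.map Prod.fst) := (PySem.List.mem_dedup _ _).mpr hc
      rw [pv_contains_mkmap, if_pos (by simpa using hc')]
      rw [pv_modify_mkmap _ _ (PySem.List.nodup_dedup _) _ hc']
      have hded : PySem.List.dedup ((ps ++ [(c, t)]).map Prod.fst) = PySem.List.dedup (ps.map Prod.fst) := by
        rw [List.map_append, List.map_cons, List.map_nil, pv_dedup_append, if_pos hc]
      rw [hded]
      congr 1
      apply List.map_congr_left
      intro k _
      by_cases hkc : k = c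
      · subst hkc
        simp [List.filter_append, PySem.Dict.counter_append_singleton]
      · have : ((c, t).1 == k) = false := by simpa using fun h => hkc h.symm
        simp [List.filter_append, this, hkc]
    · -- new cluster: A appends an empty Counter then modifies it; the spec appends counter [t]
      have hc' : c ∉ PySem.List.dedup (ps.map Prod.fst) := fun h => hc ((PySem.List.mem_dedup _ _).mp h)
      rw [pv_contains_mkmap, if_neg (by simpa using hc')]
      have hins : (PySem.Dict.mk ((PySem.List.dedup (ps.map Prod.fst)).map
            (fun k => (k, PySem.Dict.counter ((ps.filter (fun p => p.1 == k)).map Prod.snd))))).insert c PySem.Dict.empty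
          = PySem.Dict.mk ((PySem.List.dedup (ps.map Prod.fst) ++ [c]).map
            (fun k => (k, if k = c then PySem.Dict.empty
              else PySem.Dict.counter ((ps.filter (fun p => p.1 == k)).map Prod.snd)))) := by
        rw [PySem.Dict.insert, pv_contains_mkmap, if_neg (by simpa using hc')]
        congr 1
        rw [List.map_append, List.map_cons, List.map_nil, if_pos rfl]
        congr 1
        apply List.map_congr_left
        intro k hk
        have : k ≠ c := fun h => hc' (h ▸ hk)
        simp [this]
      rw [hins, pv_modify_mkmap _ _ ?nodup _ (by simp) _ _]
      case nodup =>
        exact (List.nodup_append_comm).mpr (List.Nodup.cons hc' (PySem.List.nodup_dedup _))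
      have hded : PySem.List.dedup ((ps ++ [(c, t)]).map Prod.fst)
          = PySem.List.dedup (ps.map Prod.fst) ++ [c] := by
        rw [List.map_append, List.map_cons, List.map_nil, pv_dedup_append, if_neg hc]
      rw [hded]
      congr 1
      apply List.map_congr_left
      intro k hk
      by_cases hkc : k = c
      · subst hkc
        have hnil : ps.filter (fun p => p.1 == k) = [] := by
          rw [List.filter_eq_nil_iff]
          intro p hp hb
          apply hc
          have hpk : p.1 = k := by simpa using hb
          exact hpk ▸ List.mem_map_of_mem hp
        simp [List.filter_append, hnil, PySem.Dict.counter, PySem.Dict.modify]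
      · have hkc' : ((c, t).1 == k) = false := by simpa using fun h => hkc h.symm
        simp [List.filter_append, hkc, hkc']

-- ===== VERDICT (by name: the statement is the Claim_ definition above) =====
theorem build_cluster_data_py_spec : Claim_equal_build_cluster_data_py := by
  intro tokens synonym_map _
  unfold Spec_build_cluster_data_py build_cluster_data_py build_cluster_data_py_alt
  rw [pv_foldA_eq, pv_fold_spec]
  simp [pvSpecDict, List.filterMap_map, List.map_map, Function.comp]
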